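-- pv_equiv track=rewrite | github.com/TarcisioRickson/Qlearning-main | client.py | conversion
-- ===== SOURCE A (Python) =====
-- def conversion(state):
--     platform = str(state)[2:7]
--     direction = str(state)[7:9]
--
--     platform_inversed = ''.join(reversed(platform))
--     direction_inversed = ''.join(reversed(direction))
--
--     iterations = 0
--     platform_dec = 0
--     direction_dec = 0
--
--     for i in platform_inversed:
--         if i == '1':
--             platform_dec += 2 ** iterations
--
--         iterations += 1
--
--     iterations = 0
--
--     for j in direction_inversed:
--         if j == '1':
--             direction_dec += 2 ** iterations
--
--         iterations += 1
--
--     return (platform_dec, direction_dec)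
-- ===== SOURCE B (Python) =====
-- def conversion(state):
--     s = str(state)
--
--     def horner(bits):
--         dec = 0
--         for c in bits:
--             dec = dec * 2 + (1 if c == '1' else 0)
--         return dec
--
--     return (horner(s[2:7]), horner(s[7:9]))
-- ===== Notes on version B (the rewrite author's own statement) =====
-- stated objective: simpler
-- what changed: Replaces the reverse-then-sum-of-2**iterations scheme (reversed join, iterations counter, exponentiation per '1') with a single forward Horner accumulation dec = dec*2 + bit shared by both substrings.
import Mathlib
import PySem

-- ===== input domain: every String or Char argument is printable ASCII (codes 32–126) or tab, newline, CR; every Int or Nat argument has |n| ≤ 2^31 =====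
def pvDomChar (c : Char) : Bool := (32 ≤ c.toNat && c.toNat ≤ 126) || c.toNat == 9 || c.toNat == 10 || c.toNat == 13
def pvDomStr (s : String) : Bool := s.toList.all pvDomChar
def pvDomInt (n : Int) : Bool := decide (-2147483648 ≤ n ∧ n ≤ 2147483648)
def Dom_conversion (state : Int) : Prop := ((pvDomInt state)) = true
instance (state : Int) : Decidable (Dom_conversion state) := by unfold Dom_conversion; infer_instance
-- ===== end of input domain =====

-- B replaces A's reverse-then-sum-of-powers scheme with a single forward Horner accumulation (simpler).


-- ===== PORT A =====
-- the two for-loops of A: state = (dec, iterations); dec += 2**iterations when the char is '1'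
def convLoopA (cs : List Char) : Int × Nat :=
  cs.foldl (fun (st : Int × Nat) i => (if i = '1' then st.1 + 2 ^ st.2 else st.1, st.2 + 1)) (0, 0)

def conversion (state : Int) : Int × Int :=
  let s := PySem.Int.toChars state
  let platform := PySem.List.slice s (some 2) (some 7)
  let direction := PySem.List.slice s (some 7) (some 9)
  let platform_inversed := platform.reverse
  let direction_inversed := direction.reverse
  ((convLoopA platform_inversed).1, (convLoopA direction_inversed).1)

-- ===== PORT B =====
-- forward Horner scan: dec = dec*2 + bit
def hornerB (bits : List Char) : Int :=
  bits.foldl (fun dec c => dec * 2 + if c = '1' then 1 else 0) 0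

def conversion_alt (state : Int) : Int × Int :=
  let s := PySem.Int.toChars state
  (hornerB (PySem.List.slice s (some 2) (some 7)), hornerB (PySem.List.slice s (some 7) (some 9)))

-- ===== PRECONDITION & SPEC =====
def Spec_conversion (state : Int) (out : Int × Int) : Prop := out = conversion_alt state
instance (state : Int) (out : Int × Int) : Decidable (Spec_conversion state out) := by unfold Spec_conversion; infer_instance

-- ===== CLAIM (what is proved, stated in full; the proofs are below) =====
def Claim_equal_conversion : Prop := ∀ (state : Int), Dom_conversion state → Spec_conversion state (conversion state)

-- ===== LEMMAS AND PROOFS =====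
-- A's loop over a list computes, from start (d, k), d + 2^k · Horner of the reversed list
lemma convLoopA_eq (l : List Char) (d : Int) (k : Nat) :
    (l.foldl (fun (st : Int × Nat) i => (if i = '1' then st.1 + 2 ^ st.2 else st.1, st.2 + 1)) (d, k)).1
      = d + 2 ^ k * hornerB l.reverse := by
  induction l generalizing d k with
  | nil => simp [hornerB]
  | cons c l ih =>
    have h3 : hornerB (l.reverse ++ [c]) = hornerB l.reverse * 2 + (if c = '1' then (1 : Int) else 0) := by
      unfold hornerB; rw [List.foldl_append]; simp [List.foldl]
    rw [List.foldl_cons, ih, List.reverse_cons, h3]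
    split_ifs <;> ring

lemma convLoopA_reverse (l : List Char) : (convLoopA l.reverse).1 = hornerB l := by
  unfold convLoopA
  rw [convLoopA_eq, List.reverse_reverse]
  simp

-- ===== VERDICT (by name: the statement is the Claim_ definition above) =====
theorem conversion_spec : Claim_equal_conversion := by
  intro state _
  unfold Spec_conversion conversion conversion_alt
  simp only [convLoopA_reverse]
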